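-- pv_equiv track=rewrite | github.com/imio21777/PewLSTM | run_modified_pewlstm.py | calc_park_cnt_from_dict
-- ===== SOURCE A (Python) =====
-- from typing import Dict, Iterable, List, Sequence, Tuple
--
-- def calc_park_cnt_from_dict(p_dict: Dict[int, Dict[str, int]]) -> List[int]:
--     if not p_dict:
--         return []
--     start_hour = min(p_dict.keys())
--     end_hour = max(p_dict.keys())
--     sequence: List[int] = []
--     for hour in range(start_hour, end_hour + 1):
--         if hour in p_dict:
--             sequence.append(p_dict[hour]["cnt"])
--         else:
--             sequence.append(0)
--     return sequence
-- ===== SOURCE B (Python) =====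
-- def calc_park_cnt_from_dict(p_dict):
--     if not p_dict:
--         return []
--     first = next(iter(p_dict))
--     s = e = first
--     for h in p_dict:
--         if h < s:
--             s = h
--         if e < h:
--             e = h
--     seq = [0] * (e - s + 1)
--     for h, v in p_dict.items():
--         seq[h - s] = v["cnt"]
--     return seq
-- ===== Notes on version B (the rewrite author's own statement) =====
-- stated objective: alternative
-- what changed: B finds the min/max hour with one hand-written tracking loop and then scatters each dict item into a preallocated zero array, instead of calling min()/max() and gathering over the whole hour range with a per-hour membership test.
import Mathlib
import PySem

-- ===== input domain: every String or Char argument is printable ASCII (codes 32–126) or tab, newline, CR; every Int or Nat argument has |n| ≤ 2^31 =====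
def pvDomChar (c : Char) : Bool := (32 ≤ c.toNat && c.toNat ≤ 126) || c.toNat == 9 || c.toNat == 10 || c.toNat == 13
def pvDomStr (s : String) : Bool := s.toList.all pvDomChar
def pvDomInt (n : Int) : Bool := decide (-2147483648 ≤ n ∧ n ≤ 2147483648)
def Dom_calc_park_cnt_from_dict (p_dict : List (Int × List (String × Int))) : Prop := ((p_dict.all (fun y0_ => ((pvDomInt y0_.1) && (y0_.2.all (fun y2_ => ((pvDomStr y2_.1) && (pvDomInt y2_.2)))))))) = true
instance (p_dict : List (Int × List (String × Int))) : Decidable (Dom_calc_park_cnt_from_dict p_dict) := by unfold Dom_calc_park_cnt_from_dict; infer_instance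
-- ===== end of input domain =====

-- B finds the min/max hour with one hand-written tracking loop and scatters the items
-- into a preallocated zero array by recursion, instead of A's min()/max() calls and a
-- gather over the whole hour range with a membership test (objective: alternative).

-- ===== PORT A =====
def calc_park_cnt_from_dict (p_dict : List (Int × List (String × Int))) : List Int :=
  if p_dict = [] then []
  else
    let keys := p_dict.map Prod.fst
    let start_hour := (PySem.List.min? keys (fun x => x)).getD 0   -- getD unreachable: keys ≠ []
    let end_hour := (PySem.List.max? keys (fun x => x)).getD 0
    (PySem.List.pyRange start_hour (end_hour + 1) 1).foldl
      (fun seq hour =>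
        if keys.contains hour then
          seq ++ [(((p_dict.lookup hour).getD []).lookup "cnt").getD 0]   -- getD unreachable under Pre_
        else seq ++ [0]) []

-- ===== PORT B =====
-- the min/max tracking loop of Source B
def pvBounds : List (Int × List (String × Int)) → Int × Int → Int × Int
  | [], se => se
  | hv :: t, (s, e) =>
      pvBounds t (if hv.1 < s then hv.1 else s, if e < hv.1 then hv.1 else e)

-- the scatter loop of Source B: seq[h - s] = v["cnt"]
def pvScatter (s : Int) : List (Int × List (String × Int)) → List Int → List Int
  | [], seq => seq
  | hv :: t, seq => pvScatter s t (seq.set (hv.1 - s).toNat ((hv.2.lookup "cnt").getD 0))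

def calc_park_cnt_from_dict_alt (p_dict : List (Int × List (String × Int))) : List Int :=
  match p_dict with
  | [] => []
  | first :: _ =>
      match pvBounds p_dict (first.1, first.1) with
      | (s, e) => pvScatter s p_dict (List.replicate (e - s + 1).toNat 0)

-- ===== PRECONDITION & SPEC =====
-- Pre_ excludes association lists with duplicate hour keys (not representable as the
-- Python dict argument, so A's first-match reading of them is arbitrary) and entries
-- whose value dict lacks the key "cnt", on which A raises KeyError.
def Pre_calc_park_cnt_from_dict (p_dict : List (Int × List (String × Int))) : Prop :=
  (p_dict.map Prod.fst).Nodup ∧ ∀ hv ∈ p_dict, "cnt" ∈ hv.2.map Prod.fst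
instance (p_dict : List (Int × List (String × Int))) : Decidable (Pre_calc_park_cnt_from_dict p_dict) := by unfold Pre_calc_park_cnt_from_dict; infer_instance
def pvWitness_calc_park_cnt_from_dict : (List (Int × List (String × Int))) :=
  [(3, [("cnt", 5)]), (6, [("cnt", 2)])]

def Spec_calc_park_cnt_from_dict (p_dict : List (Int × List (String × Int))) (out : List Int) : Prop := out = calc_park_cnt_from_dict_alt p_dict
instance (p_dict : List (Int × List (String × Int))) (out : List Int) : Decidable (Spec_calc_park_cnt_from_dict p_dict out) := by unfold Spec_calc_park_cnt_from_dict; infer_instance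

-- ===== CLAIM (what is proved, stated in full; the proofs are below) =====
def Claim_equal_calc_park_cnt_from_dict : Prop := ∀ (p_dict : List (Int × List (String × Int))), Dom_calc_park_cnt_from_dict p_dict → Pre_calc_park_cnt_from_dict p_dict → Spec_calc_park_cnt_from_dict p_dict (calc_park_cnt_from_dict p_dict)

-- ===== LEMMAS AND PROOFS =====

-- lookup is none exactly when the key is absent from the first components
theorem pv_lookup_eq_none {α β : Type} [BEq α] [LawfulBEq α] (l : List (α × β)) (a : α)
    (h : a ∉ l.map Prod.fst) : l.lookup a = none := by
  induction l with
  | nil => rfl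
  | cons hd t ih =>
    simp only [List.map_cons, List.mem_cons, not_or] at h
    simp only [List.lookup]
    rw [show (a == hd.1) = false from beq_eq_false_iff_ne.mpr h.1]
    exact ih h.2

theorem pv_lookup_isSome {α β : Type} [BEq α] [LawfulBEq α] (l : List (α × β)) (a : α) :
    (l.lookup a).isSome = true ↔ a ∈ l.map Prod.fst := by
  induction l with
  | nil => simp [List.lookup]
  | cons hd t ih =>
    simp only [List.lookup, List.map_cons, List.mem_cons]
    by_cases e : a = hd.1
    · simp [e]
    · rw [show (a == hd.1) = false from beq_eq_false_iff_ne.mpr e]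
      simp [ih, e]

-- folding appends is mapping
theorem pv_foldl_append {α β : Type} (g : α → β) (l : List α) (init : List β) :
    l.foldl (fun acc x => acc ++ [g x]) init = init ++ l.map g := by
  induction l generalizing init with
  | nil => simp
  | cons h t ih => simp [List.foldl, ih]

-- the tracking loop computes the running min and max of the keys
theorem pv_bounds_eq (l : List (Int × List (String × Int))) (s0 e0 : Int) :
    pvBounds l (s0, e0)
      = ((l.map Prod.fst).foldl min s0, (l.map Prod.fst).foldl max e0) := by
  induction l generalizing s0 e0 with
  | nil => rfl
  | cons hd t ih =>
    have h1 : (if hd.1 < s0 then hd.1 else s0) = min s0 hd.1 := by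
      rcases le_total s0 hd.1 with h | h <;> simp [min_def] <;> omega
    have h2 : (if e0 < hd.1 then hd.1 else e0) = max e0 hd.1 := by
      rcases le_total e0 hd.1 with h | h <;> simp [max_def] <;> omega
    simp only [pvBounds, List.map_cons, List.foldl_cons, ih, h1, h2]

theorem pv_scatter_length (s : Int) (l : List (Int × List (String × Int)))
    (init : List Int) : (pvScatter s l init).length = init.length := by
  induction l generalizing init with
  | nil => rfl
  | cons h t ih => simp [pvScatter, ih]

-- the scatter loop, element by element
theorem pv_scatter_getElem? (l : List (Int × List (String × Int))) (s : Int)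
    (hnd : (l.map Prod.fst).Nodup)
    (init : List Int)
    (hb : ∀ hv ∈ l, s ≤ hv.1 ∧ (hv.1 - s).toNat < init.length)
    (j : ℕ) :
    (pvScatter s l init)[j]?
      = match l.lookup (s + (j : Int)) with
        | some v => some ((v.lookup "cnt").getD 0)
        | none => init[j]? := by
  induction l generalizing init with
  | nil => rfl
  | cons hd t ih =>
    simp only [List.map_cons, List.nodup_cons] at hnd
    have hbhd := hb hd (by simp)
    have hbt : ∀ hv ∈ t, s ≤ hv.1 ∧ (hv.1 - s).toNat < (init.set (hd.1 - s).toNat ((hd.2.lookup "cnt").getD 0)).length := by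
      intro hv hm; simpa using hb hv (by simp [hm])
    simp only [pvScatter, List.lookup]
    rw [ih hnd.2 _ hbt]
    by_cases e : hd.1 = s + (j : Int)
    · have hj : (hd.1 - s).toNat = j := by omega
      have hnone : t.lookup (s + (j : Int)) = none := by
        apply pv_lookup_eq_none
        intro hmem; exact hnd.1 (e ▸ hmem)
      rw [hnone, show (s + (j : Int) == hd.1) = true from beq_iff_eq.mpr e.symm]
      have hjlen : j < init.length := hj ▸ hbhd.2
      show (init.set (hd.1 - s).toNat _)[j]? = some _
      rw [hj, List.getElem?_set_self hjlen]
    · have hj : (hd.1 - s).toNat ≠ j := by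
        intro hc; exact e (by omega)
      rw [show (s + (j : Int) == hd.1) = false from beq_eq_false_iff_ne.mpr (fun h => e h.symm)]
      cases t.lookup (s + (j : Int)) with
      | some v => rfl
      | none =>
        show ((init.set (hd.1 - s).toNat ((hd.2.lookup "cnt").getD 0))[j]? : Option Int) = init[j]?
        exact List.getElem?_set_ne hj

-- ===== VERDICT (by name: the statement is the Claim_ definition above) =====
theorem calc_park_cnt_from_dict_spec : Claim_equal_calc_park_cnt_from_dict := by
  intro p_dict _ hpre
  unfold Spec_calc_park_cnt_from_dict
  obtain ⟨hnd, hcnt⟩ := hpre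
  cases p_dict with
  | nil => rfl
  | cons hd t =>
    unfold calc_park_cnt_from_dict calc_park_cnt_from_dict_alt
    rw [if_neg (by simp)]
    set keys := (hd :: t).map Prod.fst with hkeys
    have hm : PySem.List.min? keys (fun x => x) = some ((t.map Prod.fst).foldl min hd.1) := by
      rw [hkeys, List.map_cons]; exact PySem.List.min?_id_cons hd.1 (t.map Prod.fst)
    have hM : PySem.List.max? keys (fun x => x) = some ((t.map Prod.fst).foldl max hd.1) := by
      rw [hkeys, List.map_cons]; exact PySem.List.max?_id_cons hd.1 (t.map Prod.fst)
    set m := (t.map Prod.fst).foldl min hd.1 with hmdef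
    set M := (t.map Prod.fst).foldl max hd.1 with hMdef
    have hmin : ∀ y ∈ keys, m ≤ y := fun y hy => PySem.List.min?_isMin hm y hy
    have hmax : ∀ y ∈ keys, y ≤ M := fun y hy => PySem.List.max?_isMax hM y hy
    simp only [hm, hM, Option.getD_some]
    -- B's bounds loop computes the same m and M
    have hbounds : pvBounds (hd :: t) (hd.1, hd.1) = (m, M) := by
      rw [pv_bounds_eq]
      simp only [List.map_cons, List.foldl_cons, min_self, max_self, hmdef, hMdef]
    rw [hbounds]
    -- A side as a map
    have hfun : (fun (seq : List Int) hour =>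
        if keys.contains hour then seq ++ [(((hd :: t).lookup hour).getD []).lookup "cnt" |>.getD 0]
        else seq ++ [0])
      = fun (seq : List Int) hour =>
          seq ++ [if keys.contains hour then ((((hd :: t).lookup hour).getD []).lookup "cnt").getD 0 else 0] := by
      funext seq hour; split_ifs <;> rfl
    rw [hfun, pv_foldl_append (fun hour =>
      if keys.contains hour then ((((hd :: t).lookup hour).getD []).lookup "cnt").getD 0 else 0)]
    rw [List.nil_append]
    -- extensionality
    have hb : ∀ hv ∈ (hd :: t), m ≤ hv.1 ∧ (hv.1 - m).toNat < (List.replicate (M - m + 1).toNat (0:Int)).length := by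
      intro hv hmem
      have hk : hv.1 ∈ keys := by rw [hkeys]; exact List.mem_map_of_mem hmem
      have h1 := hmin hv.1 hk
      have h2 := hmax hv.1 hk
      refine ⟨h1, ?_⟩
      simp only [List.length_replicate]; omega
    apply List.ext_getElem?
    intro j
    have hlenA : ((PySem.List.pyRange m (M + 1) 1).map (fun hour =>
        if keys.contains hour then ((((hd :: t).lookup hour).getD []).lookup "cnt").getD 0 else 0)).length
        = (M + 1 - m).toNat := by
      rw [List.length_map, PySem.List.length_pyRange_one]
    have hlenB := pv_scatter_length m (hd :: t) (List.replicate (M - m + 1).toNat 0)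
    have hmM : m ≤ M := by
      have hk : hd.1 ∈ keys := by rw [hkeys]; exact List.mem_map_of_mem (by simp)
      exact le_trans (hmin hd.1 hk) (hmax hd.1 hk)
    by_cases hj : j < (M + 1 - m).toNat
    · have hjA : j < ((PySem.List.pyRange m (M + 1) 1).map (fun hour =>
          if keys.contains hour then ((((hd :: t).lookup hour).getD []).lookup "cnt").getD 0 else 0)).length := by
        rw [hlenA]; exact hj
      rw [List.getElem?_eq_getElem hjA, List.getElem_map]
      rw [PySem.List.getElem_pyRange_one]
      rw [pv_scatter_getElem? (hd :: t) m hnd _ hb j]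
      by_cases hc : keys.contains (m + (j : Int))
      · have hmem : (m + (j : Int)) ∈ keys := by simpa using hc
        obtain ⟨v, hv⟩ : ∃ v, (hd :: t).lookup (m + (j : Int)) = some v := by
          have := (pv_lookup_isSome (hd :: t) (m + (j : Int))).mpr (by simpa [hkeys] using hmem)
          cases h : (hd :: t).lookup (m + (j : Int)) with
          | none => rw [h] at this; simp at this
          | some v => exact ⟨v, rfl⟩
        rw [if_pos hc, hv]
        rfl
      · have hnone : (hd :: t).lookup (m + (j : Int)) = none := by
          apply pv_lookup_eq_none
          intro hmem; exact hc (by simpa [hkeys] using hmem)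
        rw [if_neg hc, hnone]
        have : j < (List.replicate (M - m + 1).toNat (0:Int)).length := by
          simp only [List.length_replicate]; omega
        simp [List.getElem?_eq_getElem this]
    · rw [List.getElem?_eq_none (by rw [hlenA]; omega),
          List.getElem?_eq_none (by rw [hlenB]; simp only [List.length_replicate]; omega)]
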